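-- pv_equiv track=rewrite | github.com/nanajin/CodingTest_For_Practicing | 프로그래머스/unrated/147355. 크기가 작은 부분문자열/크기가 작은 부분문자열.py | solution
-- ===== SOURCE A (Python) =====
-- def solution(t, p):
--     answer = 0
--     part = []
--     for i in range(len(t)):
--         s = t[i:i+len(p)]
--         if len(s) == len(p):
--             part.append(int(s))
--     part.sort()
--     for i in part:
--         if i <= int(p):
--             answer += 1
--     return answer
-- ===== SOURCE B (Python) =====
-- def solution(t, p):
--     # simpler: walk the suffixes of t, counting full windows whose value is <= int(p)
--     answer = 0
--     rest = t
--     while rest: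
--         w = rest[:len(p)]
--         if len(w) == len(p) and int(w) <= int(p):
--             answer += 1
--         rest = rest[1:]
--     return answer
-- ===== Notes on version B (the rewrite author's own statement) =====
-- stated objective: alternative
-- what changed: B drops A's build-list/sort/count pipeline and instead walks the suffixes of t with a while loop (rest = rest[1:]), counting a suffix's length-|p| prefix directly; no intermediate list and no sort.
import Mathlib
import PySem

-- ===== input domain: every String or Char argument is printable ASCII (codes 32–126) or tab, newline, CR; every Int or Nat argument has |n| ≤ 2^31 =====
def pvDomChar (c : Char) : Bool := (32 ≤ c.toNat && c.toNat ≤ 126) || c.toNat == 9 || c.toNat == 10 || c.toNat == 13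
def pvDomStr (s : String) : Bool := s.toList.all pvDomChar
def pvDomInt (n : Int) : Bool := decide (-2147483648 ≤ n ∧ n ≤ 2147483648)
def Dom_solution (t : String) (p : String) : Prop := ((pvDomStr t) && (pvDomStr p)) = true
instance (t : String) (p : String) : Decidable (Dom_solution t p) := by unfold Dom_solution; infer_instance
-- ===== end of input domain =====

-- B replaces A's build-list / sort / scan pipeline by a direct walk over the suffixes of t,
-- counting each full-length window prefix as it goes; no intermediate list, no sort.
-- Equivalence of the RETURN value.

-- ===== PORT A =====
-- literal port of A: collect int(s) of every full-length window, sort, then count ≤ int(p)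
def solution (t : String) (p : String) : Int :=
  let tl := t.toList
  let m := p.toList.length
  let part := (List.range tl.length).foldl (fun (part : List Int) (i : Nat) =>
    if (PySem.List.slice tl (some (i : Int)) (some ((i : Int) + (m : Int)))).length = m
    then part ++ [(PySem.Int.ofChars? (PySem.List.slice tl (some (i : Int)) (some ((i : Int) + (m : Int))))).getD 0]
    else part) ([] : List Int)
  let sortedPart := PySem.List.sorted part (fun x => x) false
  sortedPart.foldl (fun (answer : Int) (i : Int) =>
    if i ≤ (PySem.Int.ofStr? p).getD 0 then answer + 1 else answer) (0 : Int)

-- ===== PORT B =====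
-- B's while loop 'rest = rest[1:]' becomes structural recursion on the suffix (a List Char),
-- carrying the running answer; w = rest[:len(p)] is '(c :: rest).take m'.
def solAltGo (m : Nat) (pv : Int) : List Char → Int → Int
  | [], answer => answer
  | c :: rest, answer =>
    let w := (c :: rest).take m
    solAltGo m pv rest
      (if w.length = m ∧ (PySem.Int.ofChars? w).getD 0 ≤ pv then answer + 1 else answer)

def solution_alt (t : String) (p : String) : Int :=
  solAltGo p.toList.length ((PySem.Int.ofStr? p).getD 0) t.toList 0

-- ===== PRECONDITION & SPEC =====
-- Pre_ excludes exactly the inputs where the Python A raises ValueError: some full-length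
-- window of t does not parse as an int, or p itself does not parse while a full-length
-- window exists (int(p) is only evaluated when a full window exists).  B raises on the same set;
-- the ports happen to agree even outside Pre_, so the proof needs no hypothesis from it.
def Pre_solution (t : String) (p : String) : Prop :=
  (∀ i ∈ List.range t.toList.length,
      ((t.toList.drop i).take p.toList.length).length = p.toList.length →
      (PySem.Int.ofChars? ((t.toList.drop i).take p.toList.length)).isSome = true) ∧
  (p.toList.length ≤ t.toList.length ∧ 0 < t.toList.length →
      (PySem.Int.ofStr? p).isSome = true)
instance (t : String) (p : String) : Decidable (Pre_solution t p) := by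
  unfold Pre_solution; infer_instance
def pvWitness_solution : String × String := ("3141592", "271")

def Spec_solution (t : String) (p : String) (out : Int) : Prop := out = solution_alt t p
instance (t : String) (p : String) (out : Int) : Decidable (Spec_solution t p out) := by
  unfold Spec_solution; infer_instance

-- ===== CLAIM (what is proved, stated in full; the proofs are below) =====
def Claim_equal_solution : Prop := ∀ (t : String) (p : String), Dom_solution t p → Pre_solution t p → Spec_solution t p (solution t p)

-- ===== LEMMAS AND PROOFS =====

-- counting fold = countP (cast to Int)
theorem foldl_if_one {α : Type} (P : α → Prop) [DecidablePred P] (l : List α) (a : Int) :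
    l.foldl (fun acc x => if P x then acc + 1 else acc) a
      = a + (l.countP (fun x => decide (P x)) : Int) := by
  induction l generalizing a with
  | nil => simp
  | cons x l ih =>
    simp only [List.foldl_cons, List.countP_cons, ih]
    by_cases h : P x
    · simp [h]; omega
    · simp [h]

-- the append-if fold of A builds a list whose countP is a countP over the index list
theorem countP_foldl_append_if {α : Type} (C : α → Prop) [DecidablePred C] (v : α → Int)
    (q : Int → Prop) [DecidablePred q] (l : List α) (acc : List Int) :
    (l.foldl (fun part i => if C i then part ++ [v i] else part) acc).countP
        (fun x => decide (q x))
      = acc.countP (fun x => decide (q x)) + l.countP (fun i => decide (C i ∧ q (v i))) := by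
  induction l generalizing acc with
  | nil => simp
  | cons i l ih =>
    simp only [List.foldl_cons, List.countP_cons, ih]
    by_cases hc : C i
    · by_cases hq : q (v i)
      · simp [hc, hq, List.countP_append]; omega
      · simp [hc, hq, List.countP_append]
    · simp [hc]

-- A's value is a countP over the window starts
theorem solution_eq_countP (t : String) (p : String) :
    solution t p
      = ((List.range t.toList.length).countP (fun i =>
          decide (((t.toList.drop i).take p.toList.length).length = p.toList.length ∧
            (PySem.Int.ofChars? ((t.toList.drop i).take p.toList.length)).getD 0
              ≤ (PySem.Int.ofStr? p).getD 0)) : Int) := by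
  unfold solution
  simp only [PySem.List.slice_natCast_add]
  rw [foldl_if_one (fun i : Int => i ≤ (PySem.Int.ofStr? p).getD 0)]
  rw [(PySem.List.sorted_perm _ _ _).countP_eq]
  rw [countP_foldl_append_if
    (fun i : Nat => ((t.toList.drop i).take p.toList.length).length = p.toList.length)
    (fun i : Nat => (PySem.Int.ofChars? ((t.toList.drop i).take p.toList.length)).getD 0)
    (fun x => x ≤ (PySem.Int.ofStr? p).getD 0)]
  simp

-- B's suffix walk computes the same countP (accumulator invariant)
theorem solAltGo_eq_countP (m : Nat) (pv : Int) (l : List Char) (ans : Int) :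
    solAltGo m pv l ans
      = ans + ((List.range l.length).countP (fun i =>
          decide (((l.drop i).take m).length = m ∧
            (PySem.Int.ofChars? ((l.drop i).take m)).getD 0 ≤ pv)) : Int) := by
  induction l generalizing ans with
  | nil => simp [solAltGo]
  | cons c rest ih =>
    simp only [solAltGo, ih]
    rw [List.length_cons, List.range_succ_eq_map]
    simp only [List.countP_cons, List.countP_map, List.drop_zero, Function.comp_def,
      List.drop_succ_cons, List.length_take, List.length_cons, List.length_drop,
      min_eq_left_iff, Nat.succ_eq_add_one, Nat.add_sub_add_right, Nat.sub_zero,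
      decide_eq_true_eq]
    split_ifs <;> omega

theorem solution_eq_alt (t : String) (p : String) : solution t p = solution_alt t p := by
  rw [solution_eq_countP]
  unfold solution_alt
  rw [solAltGo_eq_countP]
  simp

-- ===== VERDICT (by name: the statement is the Claim_ definition above) =====
theorem solution_spec : Claim_equal_solution := by
  intro t p _ _
  unfold Spec_solution
  exact solution_eq_alt t p
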